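-- pv_equiv track=rewrite | github.com/DawoodIqbal04/GIAIC_Hackathon_01 | backend/src/services/citation_service.py | merge_duplicate_citations
-- ===== SOURCE A (Python) =====
-- from typing import List
--
-- def merge_duplicate_citations(citations: List[dict]) -> List[dict]:
--     """
--     Merge citations that refer to the same source
--     """
--     unique_citations = {}
--     for citation in citations:
--         source_ref = citation.get("source_reference", "")
--         if source_ref in unique_citations:
--             # If we already have a citation for this source, combine the snippets
--             existing_snippet = unique_citations[source_ref]["content_snippet"]
--             new_snippet = citation["content_snippet"]
--             # Combine snippets, avoiding duplication
--             if new_snippet not in existing_snippet: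
--                 unique_citations[source_ref]["content_snippet"] += f" ... {new_snippet}"
--         else:
--             unique_citations[source_ref] = citation
--
--     return list(unique_citations.values())
-- ===== SOURCE B (Python) =====
-- def merge_duplicate_citations(citations):
--     # Two-phase: group citations by source_reference first, then merge each group.
--     # (Like the original, mutates the first citation of each duplicated group in place.)
--     groups = {}
--     for citation in citations:
--         groups.setdefault(citation.get("source_reference", ""), []).append(citation)
--     result = []
--     for group in groups.values():
--         first = group[0]
--         if len(group) > 1:
--             snippet = first["content_snippet"]
--             for other in group[1:]:
--                 s = other["content_snippet"]
--                 if s not in snippet: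
--                     snippet += f" ... {s}"
--             first["content_snippet"] = snippet
--         result.append(first)
--     return result
-- ===== Notes on version B (the rewrite author's own statement) =====
-- stated objective: alternative
-- what changed: B separates grouping from merging: it first builds an ordered dict mapping source_reference to the list of citations with that source, then folds each group's later snippets into the group's first citation, instead of A's single loop that merges inline into an accumulating dict.
import Mathlib
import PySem

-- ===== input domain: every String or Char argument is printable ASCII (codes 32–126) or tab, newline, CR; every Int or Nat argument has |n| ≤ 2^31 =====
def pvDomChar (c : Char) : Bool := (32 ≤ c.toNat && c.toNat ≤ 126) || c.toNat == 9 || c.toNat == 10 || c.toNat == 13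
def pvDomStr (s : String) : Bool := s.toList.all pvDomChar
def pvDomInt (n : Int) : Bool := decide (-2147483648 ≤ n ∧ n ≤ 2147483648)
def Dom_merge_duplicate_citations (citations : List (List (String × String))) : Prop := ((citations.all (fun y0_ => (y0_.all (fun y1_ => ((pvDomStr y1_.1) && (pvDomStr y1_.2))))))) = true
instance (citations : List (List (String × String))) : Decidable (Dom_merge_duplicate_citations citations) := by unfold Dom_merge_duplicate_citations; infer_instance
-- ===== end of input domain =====

-- B merges in two phases (group the citations by source_reference, then fold each group's snippets
-- into its first citation) instead of A's single inline-accumulating dict loop; equal return values.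
-- (In Python both A and B also mutate the kept citation dicts in place; the claim is about the return value.)

-- ===== PORT A =====
-- one loop iteration of A: u is A's dict of kept citations, keyed by source_reference
def mdcStepA (u : PySem.Dict String (PySem.Dict String String)) (citation : PySem.Dict String String) :
    PySem.Dict String (PySem.Dict String String) :=
  let sourceRef := citation.getD "source_reference" ""
  match u.get? sourceRef with
  | some existing =>
      -- Python raises KeyError when "content_snippet" is missing here; such inputs are excluded by Pre_
      let existingSnippet := existing.getD "content_snippet" ""
      let newSnippet := citation.getD "content_snippet" ""
      if PySem.Str.isIn newSnippet existingSnippet then u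
      else u.insert sourceRef (existing.insert "content_snippet" (existingSnippet ++ " ... " ++ newSnippet))
  | none => u.insert sourceRef citation

def merge_duplicate_citations (citations : List (List (String × String))) : List (List (String × String)) :=
  (((citations.map PySem.Dict.ofList).foldl mdcStepA PySem.Dict.empty).values).map PySem.Dict.items

-- ===== PORT B =====
-- phase 1 of B: group the citations by source_reference, in first-occurrence order
def mdcGroups (ds : List (PySem.Dict String String)) :
    PySem.Dict String (List (PySem.Dict String String)) :=
  ds.foldl (fun g c => g.modify (c.getD "source_reference" "") [] (· ++ [c])) PySem.Dict.empty

-- B's inner snippet-combining step (the body of Source B's inner `for other in group[1:]` loop)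
def mdcSnipStep (snippet : String) (other : PySem.Dict String String) : String :=
  let s := other.getD "content_snippet" ""
  if PySem.Str.isIn s snippet then snippet else snippet ++ " ... " ++ s

-- phase 2 of B: merge one group into its first citation ([] is unreachable: groups are never empty)
def mdcMergeGroup (group : List (PySem.Dict String String)) : PySem.Dict String String :=
  match group with
  | [] => PySem.Dict.empty
  | first :: rest =>
      if rest.isEmpty then first
      else first.insert "content_snippet"
        (rest.foldl mdcSnipStep (first.getD "content_snippet" ""))

def merge_duplicate_citations_alt (citations : List (List (String × String))) : List (List (String × String)) :=
  (((mdcGroups (citations.map PySem.Dict.ofList)).values).map mdcMergeGroup).map PySem.Dict.items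

-- ===== PRECONDITION & SPEC =====
-- the source reference of a citation dict (citation.get("source_reference", ""))
def mdcRef (d : PySem.Dict String String) : String := d.getD "source_reference" ""

-- two citations of the same source must both carry a "content_snippet"
def mdcRel (a b : PySem.Dict String String) : Prop :=
  mdcRef a = mdcRef b → a.contains "content_snippet" = true ∧ b.contains "content_snippet" = true

-- Pre_ excludes exactly the inputs on which A raises KeyError: two citations sharing a
-- source_reference while some citation of that duplicated source lacks a "content_snippet" key.
def Pre_merge_duplicate_citations (citations : List (List (String × String))) : Prop :=
  (citations.map PySem.Dict.ofList).Pairwise mdcRel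

instance (citations : List (List (String × String))) : Decidable (Pre_merge_duplicate_citations citations) := by
  unfold Pre_merge_duplicate_citations mdcRel; infer_instance

def pvWitness_merge_duplicate_citations : (List (List (String × String))) :=
  [[("source_reference", "s1"), ("content_snippet", "alpha")],
   [("source_reference", "s1"), ("content_snippet", "beta")],
   [("source_reference", "s2"), ("content_snippet", "gamma")]]

def Spec_merge_duplicate_citations (citations : List (List (String × String))) (out : List (List (String × String))) : Prop := out = merge_duplicate_citations_alt citations
instance (citations : List (List (String × String))) (out : List (List (String × String))) : Decidable (Spec_merge_duplicate_citations citations out) := by unfold Spec_merge_duplicate_citations; infer_instance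

-- ===== CLAIM (what is proved, stated in full; the proofs are below) =====
def Claim_equal_merge_duplicate_citations : Prop := ∀ (citations : List (List (String × String))), Dom_merge_duplicate_citations citations → Pre_merge_duplicate_citations citations → Spec_merge_duplicate_citations citations (merge_duplicate_citations citations)

-- ===== LEMMAS AND PROOFS =====

lemma mdc_G_getD (ds : List (PySem.Dict String String)) (r : String) :
    (mdcGroups ds).getD r [] = ds.filter (fun d => mdcRef d == r) := by
  have h : mdcGroups ds = (ds.map (fun c => (mdcRef c, c))).foldl
      (fun g p => g.modify p.1 [] (· ++ [p.2])) PySem.Dict.empty := by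
    rw [List.foldl_map]; rfl
  rw [h, PySem.Dict.getD_foldl_modify_append]
  simp [List.filter_map, Function.comp_def, PySem.Dict.getD_empty]

lemma mdc_G_keys (ds : List (PySem.Dict String String)) :
    (mdcGroups ds).keys = PySem.Set.ofList (ds.map mdcRef) := by
  have h : mdcGroups ds = ds.foldl
      (fun g c => g.modify (mdcRef c) [] ((fun _ _ x => x ++ [c]) g c)) PySem.Dict.empty := rfl
  rw [h, PySem.Dict.keys_foldl_modify_key]
  simp [PySem.Dict.keys_empty, PySem.Set.update_nil_left]

lemma mdc_insert_getD_self (d : PySem.Dict String String) (k : String) (dflt : String)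
    (hc : d.contains k = true) (hnd : d.keys.Nodup) :
    d.insert k (d.getD k dflt) = d := by
  apply PySem.Dict.ext
  rw [PySem.Dict.items_insert_of_contains _ _ hc]
  conv_rhs => rw [← List.map_id d.items]
  apply List.map_congr_left
  intro p hp
  by_cases h : p.1 = k
  · have hm : (k, p.2) ∈ d.items := by rw [← h]; exact hp
    have hv : d.getD k dflt = p.2 := PySem.Dict.getD_of_mem_items _ hm hnd dflt
    simp [h, hv, Prod.ext_iff]
  · simp [h]

lemma mdc_mergeGroup_append (first : PySem.Dict String String)
    (rest : List (PySem.Dict String String)) (c : PySem.Dict String String)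
    (hf : first.contains "content_snippet" = true) (hnd : first.keys.Nodup) :
    mdcMergeGroup (first :: rest ++ [c]) =
      (let ex := (mdcMergeGroup (first :: rest)).getD "content_snippet" ""
       let s := c.getD "content_snippet" ""
       if PySem.Str.isIn s ex then mdcMergeGroup (first :: rest)
       else (mdcMergeGroup (first :: rest)).insert "content_snippet" (ex ++ " ... " ++ s)) := by
  cases rest with
  | nil =>
      by_cases h : PySem.Str.isIn (c.getD "content_snippet" "") (first.getD "content_snippet" "") = true
      · simp only [mdcMergeGroup, List.singleton_append, List.isEmpty_cons, List.isEmpty_nil,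
          Bool.false_eq_true, if_false, if_true, List.foldl_cons, List.foldl_nil, mdcSnipStep,
          if_pos h]
        exact mdc_insert_getD_self first _ _ hf hnd
      · simp only [mdcMergeGroup, List.singleton_append, List.isEmpty_cons, List.isEmpty_nil,
          Bool.false_eq_true, if_false, if_true, List.foldl_cons, List.foldl_nil, mdcSnipStep,
          if_neg h]
  | cons r rs =>
      simp only [mdcMergeGroup, List.cons_append, List.isEmpty_cons, Bool.false_eq_true, if_false,
        List.foldl_cons, List.foldl_append, List.foldl_nil, PySem.Dict.getD_insert_self]
      generalize (rs.foldl mdcSnipStep (mdcSnipStep (first.getD "content_snippet" "") r)) = A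
      by_cases h : PySem.Str.isIn (c.getD "content_snippet" "") A = true
      · simp only [mdcSnipStep, if_pos h]
      · simp only [mdcSnipStep, if_neg h]
        exact (PySem.Dict.insert_insert_self _ _ _ _).symm

lemma mdc_SA_get? (ds : List (PySem.Dict String String)) (r : String)
    (hP : ds.Pairwise mdcRel) (hnd : ∀ d ∈ ds, d.keys.Nodup) :
    (ds.foldl mdcStepA PySem.Dict.empty).get? r =
      (if ds.filter (fun d => mdcRef d == r) = [] then none
       else some (mdcMergeGroup (ds.filter (fun d => mdcRef d == r)))) := by
  revert hP hnd
  induction ds using List.reverseRecOn generalizing r with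
  | nil => intro _ _; simp [PySem.Dict.get?_empty]
  | append_singleton ds c ih =>
      intro hP hnd
      rw [List.pairwise_append] at hP
      obtain ⟨hPds, -, hRel⟩ := hP
      have hndds : ∀ d ∈ ds, d.keys.Nodup := fun d hd => hnd d (List.mem_append_left _ hd)
      rw [List.foldl_append, List.foldl_cons, List.foldl_nil]
      set u := ds.foldl mdcStepA PySem.Dict.empty with hu
      have hrc : (mdcStepA u c) = mdcStepA u c := rfl
      -- closed form of filter over the appended list
      have hfilt : ∀ x : String, (ds ++ [c]).filter (fun d => mdcRef d == x) =
          ds.filter (fun d => mdcRef d == x) ++ (if mdcRef c == x then [c] else []) := by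
        intro x
        rw [List.filter_append]
        simp only [List.filter_cons, List.filter_nil]
      by_cases hg : ds.filter (fun d => mdcRef d == mdcRef c) = []
      · -- no earlier citation with this source: A inserts c
        have hnone : u.get? (mdcRef c) = none := by
          rw [ih (mdcRef c) hPds hndds, if_pos hg]
        have hstep : mdcStepA u c = u.insert (mdcRef c) c := by
          simp only [mdcStepA, mdcRef] at hnone ⊢
          rw [hnone]
        rw [hstep]
        by_cases hr : r = mdcRef c
        · subst hr
          rw [PySem.Dict.get?_insert_self, hfilt, hg]
          simp [mdcMergeGroup]
        · rw [PySem.Dict.get?_insert_of_ne _ _ hr, hfilt]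
          have : (mdcRef c == r) = false := by simpa using fun h => hr h.symm
          rw [this]
          simp only [if_false, List.append_nil, Bool.false_eq_true]
          exact ih r hPds hndds
      · -- duplicate source: A merges into the stored first citation
        obtain ⟨first, rest, hgrp⟩ := List.exists_cons_of_ne_nil hg
        have hsome : u.get? (mdcRef c) = some (mdcMergeGroup (first :: rest)) := by
          rw [ih (mdcRef c) hPds hndds, if_neg hg, hgrp]
        have hfirstmem : first ∈ ds.filter (fun d => mdcRef d == mdcRef c) := by
          rw [hgrp]; exact List.mem_cons_self
        have hfirst_ds : first ∈ ds := (List.mem_filter.mp hfirstmem).1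
        have hfirst_ref : mdcRef first = mdcRef c := by
          have := (List.mem_filter.mp hfirstmem).2
          simpa using this
        have hfc : first.contains "content_snippet" = true :=
          ((hRel first hfirst_ds c (List.mem_singleton.mpr rfl)) hfirst_ref).1
        have hfnd : first.keys.Nodup := hndds first hfirst_ds
        have hext := mdc_mergeGroup_append first rest c hfc hfnd
        simp only [] at hext
        set ex := (mdcMergeGroup (first :: rest)).getD "content_snippet" "" with hex
        set snew := c.getD "content_snippet" "" with hsnew
        by_cases hin : PySem.Str.isIn snew ex = true
        · have hstep : mdcStepA u c = u := by
            simp only [mdcStepA, mdcRef] at hsome ⊢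
            rw [hsome]
            have hin' : PySem.Chars.isIn snew.toList ex.toList = true := by
              simpa [PySem.Str.isIn] using hin
            simp [← hex, ← hsnew, hin']
          rw [hstep]
          by_cases hr : r = mdcRef c
          · subst hr
            rw [hsome, hfilt, hgrp]
            simp only [beq_self_eq_true, if_true]
            have hne : (first :: rest) ++ [c] ≠ [] := by simp
            rw [if_neg (by simp)]
            rw [hext, if_pos hin]
          · rw [hfilt]
            have : (mdcRef c == r) = false := by simpa using fun h => hr h.symm
            rw [this]
            simp only [if_false, List.append_nil, Bool.false_eq_true]
            exact ih r hPds hndds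
        · have hstep : mdcStepA u c = u.insert (mdcRef c)
              ((mdcMergeGroup (first :: rest)).insert "content_snippet" (ex ++ " ... " ++ snew)) := by
            simp only [mdcStepA, mdcRef] at hsome ⊢
            rw [hsome]
            have hin' : PySem.Chars.isIn snew.toList ex.toList = false := by
              simpa [PySem.Str.isIn] using hin
            simp [← hex, ← hsnew, hin']
          rw [hstep]
          by_cases hr : r = mdcRef c
          · subst hr
            rw [PySem.Dict.get?_insert_self, hfilt, hgrp]
            simp only [beq_self_eq_true, if_true]
            rw [if_neg (by simp)]
            rw [hext, if_neg hin]
          · rw [PySem.Dict.get?_insert_of_ne _ _ hr, hfilt]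
            have : (mdcRef c == r) = false := by simpa using fun h => hr h.symm
            rw [this]
            simp only [if_false, List.append_nil, Bool.false_eq_true]
            exact ih r hPds hndds

lemma mdc_SA_keys (ds : List (PySem.Dict String String))
    (hP : ds.Pairwise mdcRel) (hnd : ∀ d ∈ ds, d.keys.Nodup) :
    (ds.foldl mdcStepA PySem.Dict.empty).keys = PySem.Set.ofList (ds.map mdcRef) := by
  revert hP hnd
  induction ds using List.reverseRecOn with
  | nil => intro _ _; simp [PySem.Dict.keys_empty]
  | append_singleton ds c ih =>
      intro hP hnd
      rw [List.pairwise_append] at hP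
      obtain ⟨hPds, -, hRel⟩ := hP
      have hndds : ∀ d ∈ ds, d.keys.Nodup := fun d hd => hnd d (List.mem_append_left _ hd)
      rw [List.foldl_append, List.foldl_cons, List.foldl_nil]
      set u := ds.foldl mdcStepA PySem.Dict.empty with hu
      have hmapapp : (ds ++ [c]).map mdcRef = ds.map mdcRef ++ [mdcRef c] := by simp
      rw [hmapapp, PySem.Set.ofList_append_singleton]
      by_cases hg : ds.filter (fun d => mdcRef d == mdcRef c) = []
      · have hnone : u.get? (mdcRef c) = none := by
          rw [mdc_SA_get? ds _ hPds hndds, if_pos hg]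
        have hnc : u.contains (mdcRef c) = false := by
          rw [PySem.Dict.contains_eq_isSome_get?, hnone]; rfl
        have hstep : mdcStepA u c = u.insert (mdcRef c) c := by
          simp only [mdcStepA, mdcRef] at hnone ⊢
          rw [hnone]
        rw [hstep, PySem.Dict.keys_insert_of_not_contains _ _ hnc, ih hPds hndds]
        have hnm : mdcRef c ∉ PySem.Set.ofList (ds.map mdcRef) := by
          rw [PySem.Set.mem_ofList]
          intro hmem
          obtain ⟨d, hd, hdref⟩ := List.mem_map.mp hmem
          exact (List.filter_eq_nil_iff.mp hg d hd) (by simp [hdref])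
        rw [PySem.Set.add_of_not_mem hnm]
      · obtain ⟨first, rest, hgrp⟩ := List.exists_cons_of_ne_nil hg
        have hsome : u.get? (mdcRef c) = some (mdcMergeGroup (first :: rest)) := by
          rw [mdc_SA_get? ds _ hPds hndds, if_neg hg, hgrp]
        have hc : u.contains (mdcRef c) = true := by
          rw [PySem.Dict.contains_eq_isSome_get?, hsome]; rfl
        have hmem : mdcRef c ∈ PySem.Set.ofList (ds.map mdcRef) := by
          rw [PySem.Set.mem_ofList]
          have hfmem : first ∈ ds.filter (fun d => mdcRef d == mdcRef c) := by
            rw [hgrp]; exact List.mem_cons_self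
          have h1 := (List.mem_filter.mp hfmem).1
          have h2 : mdcRef first = mdcRef c := by
            have := (List.mem_filter.mp hfmem).2
            simpa using this
          exact List.mem_map.mpr ⟨first, h1, h2⟩
        rw [PySem.Set.add_of_mem hmem, ← ih hPds hndds]
        set ex := (mdcMergeGroup (first :: rest)).getD "content_snippet" "" with hex
        set snew := c.getD "content_snippet" "" with hsnew
        by_cases hin : PySem.Str.isIn snew ex = true
        · have hstep : mdcStepA u c = u := by
            simp only [mdcStepA, mdcRef] at hsome ⊢
            rw [hsome]
            have hin' : PySem.Chars.isIn snew.toList ex.toList = true := by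
              simpa [PySem.Str.isIn] using hin
            simp [← hex, ← hsnew, hin']
          rw [hstep]
        · have hstep : mdcStepA u c = u.insert (mdcRef c)
              ((mdcMergeGroup (first :: rest)).insert "content_snippet" (ex ++ " ... " ++ snew)) := by
            simp only [mdcStepA, mdcRef] at hsome ⊢
            rw [hsome]
            have hin' : PySem.Chars.isIn snew.toList ex.toList = false := by
              simpa [PySem.Str.isIn] using hin
            simp [← hex, ← hsnew, hin']
          rw [hstep, PySem.Dict.keys_insert_of_contains _ _ hc]

-- ===== VERDICT (by name: the statement is the Claim_ definition above) =====
theorem merge_duplicate_citations_spec : Claim_equal_merge_duplicate_citations := by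
  unfold Claim_equal_merge_duplicate_citations
  intro citations _ hPre
  unfold Spec_merge_duplicate_citations merge_duplicate_citations merge_duplicate_citations_alt
  set ds := citations.map PySem.Dict.ofList with hds
  have hP : ds.Pairwise mdcRel := hPre
  have hnd : ∀ d ∈ ds, d.keys.Nodup := by
    intro d hd
    obtain ⟨l, -, rfl⟩ := List.mem_map.mp hd
    exact PySem.Dict.nodup_keys_ofList l
  have hkeysA := mdc_SA_keys ds hP hnd
  have hkeysG := mdc_G_keys ds
  have hndA : (ds.foldl mdcStepA PySem.Dict.empty).keys.Nodup := by
    rw [hkeysA]; exact PySem.Set.nodup_ofList _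
  have hndG : (mdcGroups ds).keys.Nodup := by
    rw [hkeysG]; exact PySem.Set.nodup_ofList _
  have hvalsA := PySem.Dict.values_eq_map_keys _ hndA PySem.Dict.empty
  have hvalsG := PySem.Dict.values_eq_map_keys _ hndG ([] : List (PySem.Dict String String))
  suffices hv : (ds.foldl mdcStepA PySem.Dict.empty).values =
      ((mdcGroups ds).values).map mdcMergeGroup by
    rw [hv, List.map_map]
  rw [hvalsA, hvalsG, List.map_map, hkeysA, hkeysG]
  apply List.map_congr_left
  intro k hk
  have hkmem : k ∈ ds.map mdcRef := (PySem.Set.mem_ofList _ _).mp hk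
  obtain ⟨d, hd, hdref⟩ := List.mem_map.mp hkmem
  have hfil : ds.filter (fun d => mdcRef d == k) ≠ [] := by
    intro hnil
    exact (List.filter_eq_nil_iff.mp hnil d hd) (by simp [hdref])
  have hA := mdc_SA_get? ds k hP hnd
  rw [if_neg hfil] at hA
  have : (ds.foldl mdcStepA PySem.Dict.empty).getD k PySem.Dict.empty =
      mdcMergeGroup (ds.filter (fun d => mdcRef d == k)) :=
    PySem.Dict.getD_of_get?_eq_some _ _ hA
  rw [this]
  simp only [Function.comp]
  rw [mdc_G_getD ds k]
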